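-- pv_equiv track=rewrite | github.com/AroshHeenkenda/AOC-2024 | D7/d7.py | calibrate_p2
-- ===== SOURCE A (Python) =====
-- def calibrate_p2(nums):
--     n = len(nums)
--     dp = []
--     dp.append([nums[0]])
--
--     for i in range(1, n):
--         cur = nums[i]
--         next_dp = []
--
--         for d in dp[i-1]:
--             next_dp.append(d * cur)
--             next_dp.append(d + cur)
--             next_dp.append(int(str(d)+str(cur)))
--
--         dp.append(set(next_dp))
--
--     return dp
-- ===== SOURCE B (Python) =====
-- def calibrate_p2(nums):
--     # Recomputes each prefix's reachable set independently from scratch with a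
--     # rolling frontier, instead of maintaining A's dp table in one pass.
--     def reach(k):
--         front = [nums[0]]
--         for j in range(1, k):
--             c = nums[j]
--             front = {v for d in front for v in (d * c, d + c, int(str(d) + str(c)))}
--         return front
--
--     return [[nums[0]]] + [reach(k) for k in range(2, len(nums) + 1)]
-- ===== Notes on version B (the rewrite author's own statement) =====
-- stated objective: alternative
-- what changed: Instead of one pass maintaining a dp table and extending dp[i-1] via an append loop, B recomputes each prefix's reachable set independently from scratch with a rolling frontier and a set comprehension, so no table of earlier results is consulted.
-- outside the precondition, e.g. on calibrate_p2([]): A raises IndexError, B raises IndexError; on calibrate_p2([2, -3]): A raises ValueError, B raises ValueError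
import Mathlib
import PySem

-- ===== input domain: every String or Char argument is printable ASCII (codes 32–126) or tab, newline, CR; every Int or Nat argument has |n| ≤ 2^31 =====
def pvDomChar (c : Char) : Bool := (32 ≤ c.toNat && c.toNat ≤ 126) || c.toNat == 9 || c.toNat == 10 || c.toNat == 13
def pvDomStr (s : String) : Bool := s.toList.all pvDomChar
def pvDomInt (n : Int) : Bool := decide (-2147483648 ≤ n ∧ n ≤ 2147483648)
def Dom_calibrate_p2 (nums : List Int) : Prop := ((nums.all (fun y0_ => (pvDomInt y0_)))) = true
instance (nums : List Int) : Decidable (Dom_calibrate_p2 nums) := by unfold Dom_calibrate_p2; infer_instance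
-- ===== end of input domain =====

-- B recomputes each prefix's reachable set independently from scratch with a rolling frontier,
-- instead of A's single pass over a dp table; proved equal on Pre_ (A raises elsewhere).

-- int(str(a)+str(b)); the ValueError case (negative right operand) is excluded by Pre_,
-- where ofStr? is always some, so the getD default is never used inside Pre_.
def intConcat (a b : Int) : Int :=
  (PySem.Int.ofStr? (PySem.Int.toStr a ++ PySem.Int.toStr b)).getD 0

-- ===== PORT A =====
-- nums[0], nums[i] via pyGetD: in range under Pre_ (nums nonempty, 1 ≤ i < len); dp[i-1] always in range.
def calibrate_p2 (nums : List Int) : List (List Int) :=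
  let n : Int := nums.length
  let dp : List (List Int) := [[PySem.List.pyGetD nums 0 0]]
  (PySem.List.pyRange 1 n 1).foldl (fun dp i =>
    let cur := PySem.List.pyGetD nums i 0
    let next_dp : List Int :=
      (PySem.List.pyGetD dp (i - 1) []).foldl
        (fun acc d => acc ++ [d * cur] ++ [d + cur] ++ [intConcat d cur]) []
    dp ++ [PySem.Set.ofList next_dp]) dp

-- ===== PORT B =====
-- reach(k): the frontier over nums[:k], rebuilt from scratch; the set comprehension is
-- PySem.Set.ofList of the flatMap of the three children per frontier value.
def reach (nums : List Int) (k : Int) : List Int :=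
  (PySem.List.pyRange 1 k 1).foldl (fun front j =>
      let c := PySem.List.pyGetD nums j 0
      PySem.Set.ofList (front.flatMap (fun d => [d * c, d + c, intConcat d c])))
    [PySem.List.pyGetD nums 0 0]

def calibrate_p2_alt (nums : List Int) : List (List Int) :=
  [[PySem.List.pyGetD nums 0 0]] ++
    (PySem.List.pyRange 2 ((nums.length : Int) + 1) 1).map (fun k => reach nums k)

-- ===== PRECONDITION & SPEC =====
-- Exactly where Python A returns: nums = [] raises IndexError (nums[0]); a negative element
-- after position 0 raises ValueError (int("…" + "-…") in the concat step).
def Pre_calibrate_p2 (nums : List Int) : Prop :=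
  nums ≠ [] ∧ ∀ x ∈ nums.drop 1, 0 ≤ x
instance (nums : List Int) : Decidable (Pre_calibrate_p2 nums) := by
  unfold Pre_calibrate_p2; infer_instance

def pvWitness_calibrate_p2 : List Int := [2, 3, 4]

def Spec_calibrate_p2 (nums : List Int) (out : List (List Int)) : Prop := out = calibrate_p2_alt nums
instance (nums : List Int) (out : List (List Int)) : Decidable (Spec_calibrate_p2 nums out) := by unfold Spec_calibrate_p2; infer_instance

-- ===== CLAIM (what is proved, stated in full; the proofs are below) =====
def Claim_equal_calibrate_p2 : Prop := ∀ (nums : List Int), Dom_calibrate_p2 nums → Pre_calibrate_p2 nums → Spec_calibrate_p2 nums (calibrate_p2 nums)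

-- ===== LEMMAS AND PROOFS =====

-- the three successor values produced from one frontier value
def stepL (c v : Int) : List Int := [v * c, v + c, intConcat v c]

-- the frontier after stage m (shared characterisation of both loops)
def aFront (nums : List Int) : Nat → List Int
  | 0 => [PySem.List.pyGetD nums 0 0]
  | m + 1 => PySem.Set.ofList
      ((aFront nums m).flatMap (stepL (PySem.List.pyGetD nums ((m : Int) + 1) 0)))

-- A's loop computes the list of frontiers
theorem A_loop (nums : List Int) : ∀ (m : Nat), 1 ≤ m →
    (PySem.List.pyRange 1 (m : Int) 1).foldl (fun dp i =>
        dp ++ [PySem.Set.ofList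
          ((PySem.List.pyGetD dp (i - 1) []).foldl
            (fun acc d => acc ++ [d * PySem.List.pyGetD nums i 0] ++
              [d + PySem.List.pyGetD nums i 0] ++ [intConcat d (PySem.List.pyGetD nums i 0)]) [])])
      [[PySem.List.pyGetD nums 0 0]]
    = (List.range m).map (aFront nums) := by
  intro m hm
  induction m with
  | zero => omega
  | succ m' ih =>
    by_cases hm' : m' = 0
    · subst hm'
      rw [PySem.List.pyRange_one_eq_nil (by norm_num)]
      simp [aFront]
    · have h1 : 1 ≤ m' := by omega
      have hcast : ((m' + 1 : Nat) : Int) = (m' : Int) + 1 := by push_cast; ring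
      rw [hcast, PySem.List.pyRange_one_succ_right (by exact_mod_cast h1), List.foldl_append,
        ih h1]
      simp only [List.foldl_cons, List.foldl_nil]
      have hidx : PySem.List.pyGetD ((List.range m').map (aFront nums)) ((m' : Int) - 1) []
          = aFront nums (m' - 1) := by
        rw [show ((m' : Int) - 1) = ((m' - 1 : Nat) : Int) by omega, PySem.List.pyGetD_natCast]
        rw [List.getD_eq_getElem?_getD]
        simp [List.getElem?_map, List.getElem?_range (show m' - 1 < m' by omega)]
      rw [hidx]
      have hfold : ∀ (l : List Int) (acc : List Int),
          l.foldl (fun acc d => acc ++ [d * PySem.List.pyGetD nums (m' : Int) 0] ++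
            [d + PySem.List.pyGetD nums (m' : Int) 0] ++
            [intConcat d (PySem.List.pyGetD nums (m' : Int) 0)]) acc
          = acc ++ l.flatMap (stepL (PySem.List.pyGetD nums (m' : Int) 0)) := by
        intro l
        induction l with
        | nil => simp
        | cons a t iht => intro acc; rw [List.foldl_cons, iht]; simp [stepL]
      rw [hfold, List.nil_append, List.range_succ, List.map_append, List.map_cons, List.map_nil]
      have : aFront nums m' = PySem.Set.ofList
          ((aFront nums (m' - 1)).flatMap (stepL (PySem.List.pyGetD nums (m' : Int) 0))) := by
        have hidx2 : ((m' - 1 : Nat) : Int) + 1 = (m' : Int) := by omega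
        conv_lhs => rw [show m' = (m' - 1) + 1 by omega]
        rw [aFront, hidx2]
      rw [this]

-- B's from-scratch recomputation of prefix m+1 is the frontier after stage m
theorem reach_eq_aFront (nums : List Int) : ∀ (m : Nat),
    reach nums ((m : Int) + 1) = aFront nums m := by
  intro m
  induction m with
  | zero =>
    unfold reach
    rw [PySem.List.pyRange_one_eq_nil (by norm_num)]
    rfl
  | succ m' ih =>
    unfold reach at ih ⊢
    rw [show ((m' + 1 : Nat) : Int) + 1 = ((m' : Int) + 1) + 1 by push_cast; ring,
      PySem.List.pyRange_one_succ_right (a := 1) (b := (m' : Int) + 1) (by omega),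
      List.foldl_append, ih]
    simp only [List.foldl_cons, List.foldl_nil]
    rfl

-- B's output is the same list of frontiers
theorem B_eq (nums : List Int) (m : Nat) (hm : 1 ≤ m) :
    [[PySem.List.pyGetD nums 0 0]] ++
      (PySem.List.pyRange 2 ((m : Int) + 1) 1).map (fun k => reach nums k)
    = (List.range m).map (aFront nums) := by
  obtain ⟨m', rfl⟩ : ∃ m', m = m' + 1 := ⟨m - 1, by omega⟩
  rw [PySem.List.pyRange_one (a := 2) (b := ((m' + 1 : Nat) : Int) + 1)]
  rw [show (((m' + 1 : Nat) : Int) + 1 - 2) = ((m' : Nat) : Int) by push_cast; ring,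
    Int.toNat_natCast, List.map_map, List.range_succ_eq_map, List.map_cons]
  have h0 : aFront nums 0 = [PySem.List.pyGetD nums 0 0] := rfl
  rw [h0, List.map_map, List.singleton_append]
  congr 1
  apply List.map_congr_left
  intro i _
  show reach nums (2 + (i : Int)) = aFront nums (i + 1)
  rw [show (2 + (i : Int)) = ((i + 1 : Nat) : Int) + 1 by push_cast; ring]
  exact reach_eq_aFront nums (i + 1)

-- ===== VERDICT (by name: the statement is the Claim_ definition above) =====
theorem calibrate_p2_spec : Claim_equal_calibrate_p2 := by
  intro nums _ hpre
  obtain ⟨hne, _⟩ := hpre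
  have hlen : 1 ≤ nums.length := List.length_pos_of_ne_nil hne
  simp only [Spec_calibrate_p2, calibrate_p2, calibrate_p2_alt]
  rw [A_loop nums nums.length hlen, B_eq nums nums.length hlen]
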